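-- pv_equiv track=rewrite | github.com/belle2/externals | tools/diff_to_table.py | compute_updates
-- ===== SOURCE A (Python) =====
-- from typing import Dict, Tuple
--
-- def compute_updates(
--     old_versions: Dict[str, str],
--     new_versions: Dict[str, str],
-- ):
--     """
--     Compare old and new versions and return a sorted list of changes.
--
--     Returns:
--         List of tuples: (package, old_version, new_version)
--     """
--     all_pkgs = set(old_versions) | set(new_versions)
--     updates = []
--     for pkg in all_pkgs:
--         old_ver = old_versions.get(pkg, "")
--         new_ver = new_versions.get(pkg, "")
--         # Only include packages where the version changed
--         if old_ver != new_ver: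
--             updates.append((pkg, old_ver, new_ver))
--     # Case-insensitive sorting for nicer output
--     updates.sort(key=lambda x: x[0].casefold())
--     return updates
-- ===== SOURCE B (Python) =====
-- def compute_updates(old_versions, new_versions):
--     """
--     Compare old and new versions and return a sorted list of changes.
--
--     Built from two list comprehensions over the dicts themselves (no merged
--     key set): changed/removed old packages, then genuinely new packages.
--     """
--     changed = [(pkg, old_ver, new_versions.get(pkg, ""))
--                for pkg, old_ver in old_versions.items()
--                if old_ver != new_versions.get(pkg, "")]
--     added = [(pkg, "", new_ver)
--              for pkg, new_ver in new_versions.items()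
--              if pkg not in old_versions and new_ver != ""]
--     return sorted(changed + added, key=lambda x: x[0].casefold())
-- ===== Notes on version B (the rewrite author's own statement) =====
-- stated objective: alternative
-- what changed: B drops the merged key set and the accumulator loop: two list comprehensions over old_versions.items() (changed packages) and new_versions.items() (packages absent from old_versions with a non-empty version), concatenated and passed to sorted(); A makes one pass over set(old)|set(new) with two lookups per key, appending into a list it sorts in place. Pre_ excludes inputs where two distinct keys are casefold-equal (A's output order there depends on Python's randomized set hash order) and list representations with duplicate keys (a dict cannot have them).
import Mathlib
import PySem

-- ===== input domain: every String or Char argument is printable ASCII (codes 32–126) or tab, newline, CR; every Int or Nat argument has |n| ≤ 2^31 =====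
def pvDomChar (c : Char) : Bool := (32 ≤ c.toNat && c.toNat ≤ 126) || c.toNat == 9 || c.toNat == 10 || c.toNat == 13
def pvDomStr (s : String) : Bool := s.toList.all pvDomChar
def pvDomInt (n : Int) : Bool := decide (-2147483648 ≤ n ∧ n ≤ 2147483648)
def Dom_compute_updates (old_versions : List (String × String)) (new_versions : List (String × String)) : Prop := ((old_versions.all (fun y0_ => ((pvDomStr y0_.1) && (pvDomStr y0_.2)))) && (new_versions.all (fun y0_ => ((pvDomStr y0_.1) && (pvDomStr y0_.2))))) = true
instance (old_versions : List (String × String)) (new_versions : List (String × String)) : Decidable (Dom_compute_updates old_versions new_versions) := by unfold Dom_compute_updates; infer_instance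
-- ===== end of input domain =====

-- B replaces A's accumulator loop over the merged key set with two list comprehensions over the
-- dicts themselves (changed old packages, then genuinely new packages), concatenated and sorted —
-- alternative decomposition, same cost. casefold is ported as PySem.Str.lower, exact on the ASCII domain.

-- ===== PORT A =====
def compute_updates (old_versions : List (String × String)) (new_versions : List (String × String)) : List (String × String × String) :=
  let dOld := PySem.Dict.mk old_versions
  let dNew := PySem.Dict.mk new_versions
  let all_pkgs := PySem.Set.union (PySem.Set.ofList dOld.keys) (PySem.Set.ofList dNew.keys)
  let updates := all_pkgs.foldl (fun acc pkg =>
    let old_ver := dOld.getD pkg ""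
    let new_ver := dNew.getD pkg ""
    if old_ver ≠ new_ver then acc ++ [(pkg, old_ver, new_ver)] else acc) []
  PySem.List.sorted updates (fun x => PySem.Str.lower x.1) false

-- ===== PORT B =====
-- dict.get on the association-list representation is first-match lookup: List.lookup;
-- 'pkg not in old_versions' is membership in the key list.
def compute_updates_alt (old_versions : List (String × String)) (new_versions : List (String × String)) : List (String × String × String) :=
  let changed := old_versions.filterMap (fun kv =>
    if kv.2 ≠ ((List.lookup kv.1 new_versions).getD "") then
      some (kv.1, kv.2, (List.lookup kv.1 new_versions).getD "")
    else none)
  let added := new_versions.filterMap (fun kv =>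
    if kv.1 ∉ old_versions.map Prod.fst ∧ kv.2 ≠ "" then some (kv.1, "", kv.2) else none)
  PySem.List.sorted (changed ++ added) (fun x => PySem.Str.lower x.1) false

-- ===== PRECONDITION & SPEC =====
-- Pre_ excludes dict representations with duplicate keys (a Python dict cannot have them; first-match
-- vs last-wins is then anybody's) and inputs where two DISTINCT keys are casefold-equal, on which A's
-- output order is an accident of Python's randomized set hash order and cannot be matched deterministically.
def Pre_compute_updates (old_versions : List (String × String)) (new_versions : List (String × String)) : Prop :=
  (old_versions.map Prod.fst).Nodup ∧ (new_versions.map Prod.fst).Nodup ∧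
  ∀ a ∈ old_versions.map Prod.fst ++ new_versions.map Prod.fst,
    ∀ b ∈ old_versions.map Prod.fst ++ new_versions.map Prod.fst,
      PySem.Str.lower a = PySem.Str.lower b → a = b
instance (old_versions : List (String × String)) (new_versions : List (String × String)) : Decidable (Pre_compute_updates old_versions new_versions) := by unfold Pre_compute_updates; infer_instance

def pvWitness_compute_updates : (List (String × String)) × (List (String × String)) :=
  ([("alpha", "1.0"), ("Beta", "2")], [("alpha", "1.1"), ("gamma", "3")])

def Spec_compute_updates (old_versions : List (String × String)) (new_versions : List (String × String)) (out : List (String × String × String)) : Prop := out = compute_updates_alt old_versions new_versions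
instance (old_versions : List (String × String)) (new_versions : List (String × String)) (out : List (String × String × String)) : Decidable (Spec_compute_updates old_versions new_versions out) := by unfold Spec_compute_updates; infer_instance

-- ===== CLAIM (what is proved, stated in full; the proofs are below) =====
def Claim_equal_compute_updates : Prop := ∀ (old_versions : List (String × String)) (new_versions : List (String × String)), Dom_compute_updates old_versions new_versions → Pre_compute_updates old_versions new_versions → Spec_compute_updates old_versions new_versions (compute_updates old_versions new_versions)

-- ===== LEMMAS AND PROOFS =====

-- Dict lookup built from an association list IS first-match lookup (no Nodup needed)
theorem pv_get?_mk (l : List (String × String)) (k : String) :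
    (PySem.Dict.mk l).get? k = List.lookup k l := by
  induction l with
  | nil => rfl
  | cons x t ih =>
    rw [show ((x :: t : List (String × String))) = ((x.1, x.2) :: t) by rfl,
        PySem.Dict.get?_mk_cons, List.lookup]
    have hc : (x.1 == k) = (k == x.1) := by simp [BEq.comm]
    rw [hc]
    cases hb : (k == x.1) <;> simp [ih]

theorem pv_getD_mk_eq_lookup (l : List (String × String)) (k : String) :
    (PySem.Dict.mk l).getD k "" = (List.lookup k l).getD "" := by
  rw [PySem.Dict.getD_eq_get?_getD, pv_get?_mk]

theorem pv_lookup_of_not_mem {l : List (String × String)} {k : String}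
    (h : k ∉ l.map Prod.fst) : List.lookup k l = none := by
  induction l with
  | nil => rfl
  | cons x t ih =>
    simp only [List.map_cons, List.mem_cons, not_or] at h
    simp [List.lookup, beq_false_of_ne h.1, ih h.2]

theorem pv_map_fst_filter_map {γ : Type} (l : List (String × String)) (p : String → Bool) (f : String → γ) :
    ((l.map Prod.fst).filter p).map f = (l.filter (fun kv => p kv.1)).map (fun kv => f kv.1) := by
  induction l with
  | nil => rfl
  | cons x t ih => by_cases h : p x.1 <;> simp [h, ih]

-- a guarded comprehension is filter-then-map
theorem pv_filterMap_guard {α γ : Type} (l : List α) (p : α → Prop) [DecidablePred p] (g : α → γ) :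
    l.filterMap (fun x => if p x then some (g x) else none)
      = (l.filter (fun x => decide (p x))).map g := by
  induction l with
  | nil => rfl
  | cons x t ih => by_cases h : p x <;> simp [h, ih]

-- ===== VERDICT (by name: the statement is the Claim_ definition above) =====
theorem compute_updates_spec : Claim_equal_compute_updates := by
  intro old new _hdom hpre
  obtain ⟨hO, hN, _htie⟩ := hpre
  show compute_updates old new = compute_updates_alt old new
  simp only [compute_updates, compute_updates_alt]
  rw [PySem.List.foldl_append_ite, pv_filterMap_guard, pv_filterMap_guard]
  congr 1
  have hkeysO : (PySem.Dict.mk old).keys = old.map Prod.fst := rfl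
  have hkeysN : (PySem.Dict.mk new).keys = new.map Prod.fst := rfl
  rw [hkeysO, hkeysN]
  rw [PySem.Set.union, PySem.Set.update_eq_append_filter, PySem.Set.ofList_ofList,
      PySem.Set.ofList_eq_self_of_nodup _ hO, PySem.Set.ofList_eq_self_of_nodup _ hN]
  rw [List.filter_append, List.map_append]
  simp only [List.nil_append]
  congr 1
  · -- old-keys part = B's first comprehension
    rw [pv_map_fst_filter_map]
    rw [List.filter_congr (q := fun kv => decide (kv.2 ≠ (List.lookup kv.1 new).getD ""))
        (fun kv hkv => by
          have hm : (kv.1, kv.2) ∈ old := by simpa using hkv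
          rw [PySem.Dict.getD_of_mem_items (d := PySem.Dict.mk old) hm hO "", pv_getD_mk_eq_lookup])]
    apply List.map_congr_left
    intro kv hkv
    have hm : (kv.1, kv.2) ∈ old := by simpa using (List.mem_filter.mp hkv).1
    rw [PySem.Dict.getD_of_mem_items (d := PySem.Dict.mk old) hm hO "", pv_getD_mk_eq_lookup]
  · -- new-only keys part = B's second comprehension
    rw [List.filter_filter, pv_map_fst_filter_map]
    rw [List.filter_congr (q := fun kv => decide (kv.1 ∉ old.map Prod.fst ∧ kv.2 ≠ ""))
        (fun kv hkv => by
          have hm : (kv.1, kv.2) ∈ new := by simpa using hkv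
          by_cases hk : kv.1 ∈ old.map Prod.fst
          · simp [hk, PySem.Set.contains_eq_listContains]
          · rw [pv_getD_mk_eq_lookup, pv_lookup_of_not_mem hk,
                PySem.Dict.getD_of_mem_items (d := PySem.Dict.mk new) hm hN ""]
            have hne : ("" ≠ kv.2) = (kv.2 ≠ "") := propext ne_comm
            simp [hk, PySem.Set.contains_eq_listContains, hne])]
    apply List.map_congr_left
    intro kv hkv
    have hmf := List.mem_filter.mp hkv
    have hm : (kv.1, kv.2) ∈ new := by simpa using hmf.1
    have hcond := of_decide_eq_true hmf.2
    have hk : kv.1 ∉ old.map Prod.fst := hcond.1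
    rw [pv_getD_mk_eq_lookup, pv_lookup_of_not_mem hk,
        PySem.Dict.getD_of_mem_items (d := PySem.Dict.mk new) hm hN ""]
    rfl
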